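-- pv_equiv track=rewrite | github.com/yuryanliang/princewen-leetcode-python | Ryan/100 medium/4/221 maximal-square.py | getSquareArea
-- ===== SOURCE A (Python) =====
-- def getSquareArea(v, k):
--     if len(v)<k:
--         return 0
--     count = 0
--     for i in range(len(v)):
--         if v[i] != k :
--             count = 0
--         else:
--             count +=1
--         if count ==k :
--             return k * k
--     return 0
-- ===== SOURCE B (Python) =====
-- def getSquareArea(v, k):
--     if k > 0:
--         i, n = 0, len(v)
--         while i < n:
--             j = i
--             while j < n and v[j] == v[i]:
--                 j += 1
--             if v[i] == k and j - i >= k: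
--                 return k * k
--             i = j
--     return 0
-- ===== Notes on version B (the rewrite author's own statement) =====
-- stated objective: alternative
-- what changed: B scans the list as maximal runs with a two-pointer run-length scan (returning k*k when a run of value k has length >= k, guarded by k > 0), instead of A's per-element streak counter with reset; A's len(v) < k pre-check is subsumed by the run-length test.
import Mathlib
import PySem

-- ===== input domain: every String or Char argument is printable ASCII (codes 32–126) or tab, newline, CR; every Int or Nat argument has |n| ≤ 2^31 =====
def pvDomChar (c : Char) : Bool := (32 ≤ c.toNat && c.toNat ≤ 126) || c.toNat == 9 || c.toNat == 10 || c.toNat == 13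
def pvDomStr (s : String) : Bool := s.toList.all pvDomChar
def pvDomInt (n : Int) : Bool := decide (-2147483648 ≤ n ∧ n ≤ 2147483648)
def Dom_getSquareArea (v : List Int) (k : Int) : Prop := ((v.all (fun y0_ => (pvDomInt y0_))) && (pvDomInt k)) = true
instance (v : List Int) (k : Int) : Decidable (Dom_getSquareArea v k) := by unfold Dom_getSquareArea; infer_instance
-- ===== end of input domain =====

-- B scans maximal runs with a two-pointer run-length scan instead of A's per-element streak counter; same O(n) cost (objective: alternative).

-- ===== PORT A =====
-- the for-loop over range(len(v)) with the streak counter and early return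
def pvALoop (k : Int) : List Int → Int → Int
  | [], _ => 0
  | x :: rest, count =>
      let count' := if x ≠ k then 0 else count + 1
      if count' = k then k * k else pvALoop k rest count'

def getSquareArea (v : List Int) (k : Int) : Int :=
  if (v.length : Int) < k then 0 else pvALoop k v 0

-- ===== PORT B =====
-- outer while: one step per maximal run; the inner while-scan (j advancing over equal
-- elements) is transcribed as takeWhile/dropWhile on the remaining list
def pvRuns (k : Int) : List Int → Int
  | [] => 0
  | x :: rest =>
      let run : Int := 1 + ((rest.takeWhile (fun y => y == x)).length : Int)
      if x = k ∧ k ≤ run then k * k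
      else pvRuns k (rest.dropWhile (fun y => y == x))
termination_by l => l.length
decreasing_by
  simpa using Nat.lt_succ_of_le (List.length_dropWhile_le _ _)

def getSquareArea_alt (v : List Int) (k : Int) : Int :=
  if 0 < k then pvRuns k v else 0

-- ===== PRECONDITION & SPEC =====
def Spec_getSquareArea (v : List Int) (k : Int) (out : Int) : Prop := out = getSquareArea_alt v k
instance (v : List Int) (k : Int) (out : Int) : Decidable (Spec_getSquareArea v k out) := by unfold Spec_getSquareArea; infer_instance

-- ===== CLAIM (what is proved, stated in full; the proofs are below) =====
def Claim_equal_getSquareArea : Prop := ∀ (v : List Int) (k : Int), Dom_getSquareArea v k → Spec_getSquareArea v k (getSquareArea v k)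

-- ===== LEMMAS AND PROOFS =====

-- for k ≤ 0 the counter (kept ≥ 0) can only meet k at k = 0, where k*k = 0
theorem pvALoop_nonpos (k : Int) (hk : k ≤ 0) :
    ∀ (v : List Int) (c : Int), 0 ≤ c → pvALoop k v c = 0 := by
  intro v
  induction v with
  | nil => intro c _; rfl
  | cons x rest ih =>
      intro c hc
      by_cases hx : x ≠ k
      · simp only [pvALoop, if_pos hx]
        by_cases h0 : (0 : Int) = k
        · rw [if_pos h0]; rw [← h0]; ring
        · rw [if_neg h0]; exact ih 0 le_rfl
      · simp only [pvALoop, if_neg hx]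
        rw [if_neg (by omega)]
        exact ih (c + 1) (by omega)

-- no run can be as long as k when the whole list is shorter than k
theorem length_takeWhile_le' (p : Int → Bool) (l : List Int) :
    (l.takeWhile p).length ≤ l.length :=
  (l.takeWhile_sublist p).length_le

theorem pvRuns_short (k : Int) :
    ∀ (v : List Int), (v.length : Int) < k → pvRuns k v = 0 := by
  intro v
  induction v using pvRuns.induct k with
  | case1 => intro _; simp [pvRuns]
  | case2 x rest run htrue =>
      intro h
      exfalso
      have ht := length_takeWhile_le' (fun y => y == x) rest
      obtain ⟨-, hrun⟩ := htrue
      simp only [List.length_cons] at h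
      unfold run at hrun
      push_cast at h hrun
      omega
  | case3 x rest run hfalse ih =>
      intro h
      rw [pvRuns, if_neg hfalse]
      apply ih
      have := List.length_dropWhile_le (fun y => y == x) rest
      simp only [List.length_cons] at h
      push_cast at h ⊢
      omega

-- a prefix of non-k elements only resets the counter: with counter 0 it is a no-op
theorem pvALoop_skip (k : Int) (hk : 0 < k) :
    ∀ (ys tail : List Int), (∀ y ∈ ys, y ≠ k) →
      pvALoop k (ys ++ tail) 0 = pvALoop k tail 0 := by
  intro ys
  induction ys with
  | nil => intro tail _; rfl
  | cons y ys ih =>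
      intro tail hys
      have hy : y ≠ k := hys y (by simp)
      have hk0 : ¬ ((0 : Int) = k) := by omega
      simp only [List.cons_append, pvALoop]
      rw [if_pos hy, if_neg hk0]
      exact ih tail (fun z hz => hys z (by simp [hz]))

-- a prefix of k's advances the counter, returning k*k exactly when it reaches k
theorem pvALoop_run (k : Int) (_hk : 0 < k) :
    ∀ (ys : List Int) (tail : List Int) (c : Int), 0 ≤ c → c < k → (∀ y ∈ ys, y = k) →
      pvALoop k (ys ++ tail) c =
        if k ≤ c + ys.length then k * k else pvALoop k tail (c + ys.length) := by
  intro ys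
  induction ys with
  | nil =>
      intro tail c hc hck _
      simp only [List.nil_append, List.length_nil, Nat.cast_zero, add_zero]
      rw [if_neg (by omega)]
  | cons y ys ih =>
      intro tail c hc hck hys
      have hy : y = k := hys y (by simp)
      simp only [List.cons_append, pvALoop, hy, ne_eq, not_true_eq_false, ite_false,
        List.length_cons]
      by_cases hstep : c + 1 = k
      · rw [if_pos hstep, if_pos (by push_cast; omega)]
      · rw [if_neg hstep]
        rw [ih tail (c + 1) (by omega) (by omega) (fun z hz => hys z (by simp [hz]))]
        have harith : c + 1 + (ys.length : Int) = c + ((ys.length + 1 : Nat) : Int) := by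
          push_cast; ring
        rw [harith]

-- the counter is reset on the first element of the tail after a short run
theorem pvALoop_reset (k : Int) (_hk : 0 < k) (tail : List Int)
    (htail : tail = [] ∨ ∃ y t, tail = y :: t ∧ y ≠ k) (c : Int) :
    pvALoop k tail c = pvALoop k tail 0 := by
  rcases htail with h | ⟨y, t, rfl, hy⟩
  · subst h; rfl
  · simp [pvALoop, hy]

theorem dropWhile_head_not (p : Int → Bool) :
    ∀ (l : List Int) (y : Int) (t : List Int), l.dropWhile p = y :: t → p y = false := by
  intro l
  induction l with
  | nil => intro y t h; simp [List.dropWhile] at h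
  | cons x xs ih =>
      intro y t h
      by_cases hx : p x
      · rw [List.dropWhile_cons_of_pos hx] at h
        exact ih y t h
      · rw [List.dropWhile_cons_of_neg hx] at h
        cases h
        simpa using hx

theorem pvALoop_eq_pvRuns (k : Int) (hk : 0 < k) :
    ∀ (v : List Int), pvALoop k v 0 = pvRuns k v := by
  intro v
  induction v using pvRuns.induct k with
  | case1 => simp [pvRuns, pvALoop]
  | case2 x rest run htrue =>
      rw [pvRuns, if_pos htrue]
      obtain ⟨hx, hrun⟩ := htrue
      have hsplit : x :: rest = (x :: rest.takeWhile (fun y => y == x)) ++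
          rest.dropWhile (fun y => y == x) := by
        simp [List.takeWhile_append_dropWhile]
      rw [hsplit, pvALoop_run k hk _ _ 0 le_rfl hk]
      · rw [if_pos (by simp only [List.length_cons] at *; push_cast at *; omega)]
      · intro y hy
        rcases List.mem_cons.mp hy with h | h
        · omega
        · have := List.mem_takeWhile_imp h
          simp only [beq_iff_eq] at this
          omega
  | case3 x rest run hfalse ih =>
      rw [pvRuns, if_neg hfalse]
      have hsplit : x :: rest = (x :: rest.takeWhile (fun y => y == x)) ++
          rest.dropWhile (fun y => y == x) := by
        simp [List.takeWhile_append_dropWhile]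
      set tail := rest.dropWhile (fun y => y == x) with htail
      have htailshape : tail = [] ∨ ∃ y t, tail = y :: t ∧ y ≠ x := by
        cases h : tail with
        | nil => exact Or.inl rfl
        | cons y t =>
            refine Or.inr ⟨y, t, rfl, ?_⟩
            have := dropWhile_head_not (fun y => y == x) rest y t (htail ▸ h)
            simpa using this
      by_cases hx : x = k
      · subst hx
        have hshort : (1 : Int) + ((rest.takeWhile (fun y => y == x)).length : Int) < x := by
          by_contra hcon
          exact hfalse ⟨rfl, by unfold run; omega⟩
        rw [hsplit, pvALoop_run x hk _ _ 0 le_rfl hk]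
        · rw [if_neg (by simp only [List.length_cons]; push_cast; omega)]
          rw [pvALoop_reset x hk tail (by
              rcases htailshape with h | ⟨y, t, ht, hy⟩
              · exact Or.inl h
              · exact Or.inr ⟨y, t, ht, hy⟩)]
          exact ih
        · intro y hy
          rcases List.mem_cons.mp hy with h | h
          · exact h
          · have := List.mem_takeWhile_imp h
            simpa using this
      · rw [hsplit, pvALoop_skip k hk]
        · exact ih
        · intro y hy
          rcases List.mem_cons.mp hy with h | h
          · omega
          · have := List.mem_takeWhile_imp h
            simp only [beq_iff_eq] at this
            omega

-- ===== VERDICT (by name: the statement is the Claim_ definition above) =====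
theorem getSquareArea_spec : Claim_equal_getSquareArea := by
  intro v k _
  unfold Spec_getSquareArea getSquareArea getSquareArea_alt
  by_cases hk : 0 < k
  · rw [if_pos hk]
    by_cases hlen : (v.length : Int) < k
    · rw [if_pos hlen, pvRuns_short k v hlen]
    · rw [if_neg hlen, pvALoop_eq_pvRuns k hk]
  · rw [if_neg hk]
    by_cases hlen : (v.length : Int) < k
    · rw [if_pos hlen]
    · rw [if_neg hlen, pvALoop_nonpos k (by omega) v 0 le_rfl]
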